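-- pv_equiv track=rewrite | github.com/industdev/Naughty-Archiver-2000 | lib/runners/Ytdlp.py | stringToArgs
-- ===== SOURCE A (Python) =====
-- from typing import TYPE_CHECKING, Any
--
-- def stringToArgs(string) -> list[Any]:
--     parts = string.split()
--     args = []
--     i = 0
--     while i < len(parts):
--         if parts[i].startswith("-") and i + 1 < len(parts) and not parts[i + 1].startswith("-"):
--             args.append(f"{parts[i]} {parts[i + 1]}")
--             i += 2
--         else:
--             args.append(parts[i])
--             i += 1
--     return args
-- ===== SOURCE B (Python) =====
-- def stringToArgs(string) -> list:
--     args = []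
--     pending = None
--     for part in string.split():
--         if pending is not None:
--             if part.startswith("-"):
--                 args.append(pending)
--                 pending = part
--             else:
--                 args.append(pending + " " + part)
--                 pending = None
--         elif part.startswith("-"):
--             pending = part
--         else:
--             args.append(part)
--     if pending is not None:
--         args.append(pending)
--     return args
-- ===== Notes on version B (the rewrite author's own statement) =====
-- stated objective: alternative
-- what changed: Replaced the index-based while loop with two-step lookahead strides by a single for-loop over the parts that carries a pending-flag buffer flushed at the end; no indexing or lookahead remains.
import Mathlib
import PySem

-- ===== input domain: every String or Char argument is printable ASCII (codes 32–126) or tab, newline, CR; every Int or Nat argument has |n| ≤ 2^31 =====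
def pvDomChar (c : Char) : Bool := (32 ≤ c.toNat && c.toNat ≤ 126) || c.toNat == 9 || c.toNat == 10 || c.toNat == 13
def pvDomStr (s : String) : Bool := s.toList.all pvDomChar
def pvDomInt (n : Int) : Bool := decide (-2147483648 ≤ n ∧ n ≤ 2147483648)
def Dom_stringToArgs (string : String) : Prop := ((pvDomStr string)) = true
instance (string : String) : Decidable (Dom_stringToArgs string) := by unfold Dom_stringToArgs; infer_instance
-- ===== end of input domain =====

-- B replaces A's index/lookahead while-loop by a single pass carrying a pending-flag buffer (alternative decomposition, same cost).

-- ===== PORT A =====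
-- literal port of A's while loop over an index i with two-step strides
def stringToArgsLoop (parts : List String) (i : Nat) : List String :=
  if _h : i < parts.length then
    if PySem.Str.startswith (parts.getD i "") "-" && decide (i + 1 < parts.length)
        && !PySem.Str.startswith (parts.getD (i + 1) "") "-" then
      (parts.getD i "" ++ " " ++ parts.getD (i + 1) "") :: stringToArgsLoop parts (i + 2)
    else
      parts.getD i "" :: stringToArgsLoop parts (i + 1)
  else []
termination_by parts.length - i

def stringToArgs (string : String) : List String :=
  stringToArgsLoop (PySem.Str.split₀ string) 0

-- ===== PORT B =====
-- one step of B's for-loop: state is (args so far, pending flag)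
def altStep (st : List String × Option String) (part : String) : List String × Option String :=
  match st with
  | (args, some pending) =>
    if PySem.Str.startswith part "-" then (args ++ [pending], some part)
    else (args ++ [pending ++ " " ++ part], none)
  | (args, none) =>
    if PySem.Str.startswith part "-" then (args, some part)
    else (args ++ [part], none)

def stringToArgs_alt (string : String) : List String :=
  let st := (PySem.Str.split₀ string).foldl altStep ([], none)
  match st.2 with
  | some p => st.1 ++ [p]
  | none => st.1

-- ===== PRECONDITION & SPEC =====
def Spec_stringToArgs (string : String) (out : List String) : Prop := out = stringToArgs_alt string
instance (string : String) (out : List String) : Decidable (Spec_stringToArgs string out) := by unfold Spec_stringToArgs; infer_instance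

-- ===== CLAIM (what is proved, stated in full; the proofs are below) =====
def Claim_equal_stringToArgs : Prop := ∀ (string : String), Dom_stringToArgs string → Spec_stringToArgs string (stringToArgs string)

-- ===== LEMMAS AND PROOFS =====

-- structural recasting of A's loop, used only in the proofs
def procA : List String → List String
  | [] => []
  | [p] => [p]
  | p :: q :: rest =>
    if PySem.Str.startswith p "-" && !PySem.Str.startswith q "-" then
      (p ++ " " ++ q) :: procA rest
    else
      p :: procA (q :: rest)

def altFlush (st : List String × Option String) : List String :=
  match st.2 with
  | some p => st.1 ++ [p]
  | none => st.1

lemma loop_eq_procA (parts : List String) :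
    ∀ n i, parts.length - i ≤ n → stringToArgsLoop parts i = procA (parts.drop i) := by
  intro n
  induction n with
  | zero =>
    intro i h
    have hi : parts.length ≤ i := by omega
    rw [stringToArgsLoop]
    simp [List.drop_eq_nil_of_le hi, procA, Nat.not_lt.mpr hi]
  | succ n ih =>
    intro i h
    rw [stringToArgsLoop]
    by_cases hi : i < parts.length
    · have hdrop : parts.drop i = parts[i] :: parts.drop (i + 1) :=
        (List.getElem_cons_drop hi).symm
      have hgd : parts.getD i "" = parts[i] := by
        simp [List.getD, List.getElem?_eq_getElem hi]
      rw [dif_pos hi, hgd, hdrop]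
      by_cases hj : i + 1 < parts.length
      · have hdrop1 : parts.drop (i + 1) = parts[i + 1] :: parts.drop (i + 2) :=
          (List.getElem_cons_drop hj).symm
        have hgd1 : parts.getD (i + 1) "" = parts[i + 1] := by
          simp [List.getD, List.getElem?_eq_getElem hj]
        rw [hgd1, hdrop1, procA, decide_eq_true hj, Bool.and_true]
        cases hab : (PySem.Str.startswith parts[i] "-" && !PySem.Str.startswith parts[i+1] "-") with
        | true =>
          rw [if_pos rfl, if_pos rfl, ih (i + 2) (by omega)]
        | false =>
          rw [if_neg (by simp), if_neg (by simp), ih (i + 1) (by omega), hdrop1]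
      · have hdrop1 : parts.drop (i + 1) = [] :=
          List.drop_eq_nil_of_le (by omega)
        rw [decide_eq_false hj, Bool.and_false, Bool.false_and,
            if_neg Bool.false_ne_true, ih (i + 1) (by omega), hdrop1]
        simp [procA]
    · rw [dif_neg hi]
      rw [List.drop_eq_nil_of_le (Nat.not_lt.mp hi)]
      rfl

-- pending is always a flag (starts with "-"); under that invariant B's fold computes procA
lemma fold_eq_procA :
    ∀ (l : List String) (args : List String) (pending : Option String),
      (∀ f, pending = some f → PySem.Str.startswith f "-" = true) →
      altFlush (l.foldl altStep (args, pending)) =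
        args ++ (match pending with
                 | none => procA l
                 | some f => procA (f :: l)) := by
  intro l
  induction l with
  | nil =>
    intro args pending hinv
    cases pending with
    | none => simp [altFlush, procA]
    | some f => simp [altFlush, procA]
  | cons p l ih =>
    intro args pending hinv
    cases pending with
    | none =>
      cases hp : PySem.Str.startswith p "-" with
      | true =>
        rw [List.foldl_cons]
        simp only [altStep, hp, if_pos]
        rw [ih args (some p) (by intro f hf; cases hf; exact hp)]
      | false =>
        rw [List.foldl_cons]
        simp only [altStep, hp, Bool.false_eq_true, if_neg, not_false_iff]
        rw [ih (args ++ [p]) none (by intro f hf; cases hf)]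
        cases l with
        | nil => simp [procA]
        | cons q l' =>
          rw [procA, if_neg (by rw [hp]; simp)]
          simp
    | some f =>
      have hf : PySem.Str.startswith f "-" = true := hinv f rfl
      cases hp : PySem.Str.startswith p "-" with
      | true =>
        rw [List.foldl_cons]
        simp only [altStep, hp, if_pos]
        rw [ih (args ++ [f]) (some p) (by intro g hg; cases hg; exact hp)]
        rw [procA, if_neg (by rw [hp]; simp)]
        simp
      | false =>
        rw [List.foldl_cons]
        simp only [altStep, hp, Bool.false_eq_true, if_neg, not_false_iff]
        rw [ih (args ++ [f ++ " " ++ p]) none (by intro g hg; cases hg)]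
        rw [procA, if_pos (by rw [hf, hp]; rfl)]
        simp

-- ===== VERDICT (by name: the statement is the Claim_ definition above) =====
theorem stringToArgs_spec : Claim_equal_stringToArgs := by
  intro s _
  unfold Spec_stringToArgs stringToArgs stringToArgs_alt
  rw [loop_eq_procA _ (PySem.Str.split₀ s).length 0 (by omega)]
  have := fold_eq_procA (PySem.Str.split₀ s) [] none (by intro f hf; cases hf)
  simp only [altFlush] at this
  simp [this]
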